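-- pv_equiv track=rewrite | github.com/Jottagutierrez/Terapia-Ocupacional | proy_prueba/module_dbreader.py | F_ematch_prof_act
-- ===== SOURCE A (Python) =====
-- def F_ematch_prof_act(mat_prof, mat_act):
--     e = {}
--     for elem_prof in mat_prof.keys():
--         e[elem_prof] = {}
--         for elem_act in range(0, len(mat_act)):
--             if mat_prof[elem_prof]['Especialidad'] == mat_act[elem_act]['Especialidad']:
--                 e[elem_prof][int(elem_act)] = 1
--             else:
--                 e[elem_prof][int(elem_act)] = 0
--     return e;
-- ===== SOURCE B (Python) =====
-- def F_ematch_prof_act(mat_prof, mat_act):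
--     # one pass over mat_act: group activity indices by specialty
--     index = {}
--     for i, act in enumerate(mat_act):
--         index.setdefault(act.get('Especialidad'), []).append(i)
--     n = len(mat_act)
--     e = {}
--     for name, prof in mat_prof.items():
--         hits = index.get(prof.get('Especialidad'), [])
--         e[name] = {i: (1 if i in hits else 0) for i in range(n)}
--     return e
-- ===== Notes on version B (the rewrite author's own statement) =====
-- stated objective: alternative
-- what changed: B precomputes a one-pass specialty->activity-indices index over mat_act, then builds each professional's row by membership in the precomputed index group instead of comparing the two specialty strings for every prof/activity pair.
import Mathlib
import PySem

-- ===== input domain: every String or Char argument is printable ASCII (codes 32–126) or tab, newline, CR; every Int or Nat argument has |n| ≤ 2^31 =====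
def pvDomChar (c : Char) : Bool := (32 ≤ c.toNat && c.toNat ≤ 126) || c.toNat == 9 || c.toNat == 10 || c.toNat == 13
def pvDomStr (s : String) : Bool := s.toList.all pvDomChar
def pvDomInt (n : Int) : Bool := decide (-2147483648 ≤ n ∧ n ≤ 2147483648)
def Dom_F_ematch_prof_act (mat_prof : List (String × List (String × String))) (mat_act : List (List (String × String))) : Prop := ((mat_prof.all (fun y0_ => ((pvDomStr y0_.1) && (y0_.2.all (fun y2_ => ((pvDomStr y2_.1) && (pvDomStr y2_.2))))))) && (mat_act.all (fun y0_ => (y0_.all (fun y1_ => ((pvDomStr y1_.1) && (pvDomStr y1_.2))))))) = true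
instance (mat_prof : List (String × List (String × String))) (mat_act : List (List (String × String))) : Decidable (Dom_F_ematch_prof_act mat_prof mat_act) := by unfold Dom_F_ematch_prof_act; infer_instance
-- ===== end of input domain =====

-- B replaces A's per-pair specialty comparison with a one-pass specialty→activity-indices
-- index over mat_act plus membership lookups; a different decomposition, same asymptotic cost.

-- ===== PORT A =====
-- helper for d['Especialidad'] read as a total lookup (Pre_ excludes the KeyError inputs)
def pvSpecA (d : List (String × String)) : String := (PySem.Dict.ofList d).getD "Especialidad" ""
-- helper for d.get('Especialidad') (B's defensive lookup; None = none)
def pvSpecB (d : List (String × String)) : Option String := (PySem.Dict.ofList d).get? "Especialidad"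

def F_ematch_prof_act (mat_prof : List (String × List (String × String))) (mat_act : List (List (String × String))) : List (String × List (Int × Int)) :=
  let profD := PySem.Dict.ofList mat_prof
  (profD.keys.foldl (fun e p =>
      (PySem.List.pyRange 0 (mat_act.length : Int) 1).foldl (fun e2 i =>
        if pvSpecA (profD.getD p []) == pvSpecA (PySem.List.pyGetD mat_act i []) then
          e2.insert p ((e2.getD p PySem.Dict.empty).insert i 1)
        else
          e2.insert p ((e2.getD p PySem.Dict.empty).insert i 0))
        (e.insert p PySem.Dict.empty))
    (PySem.Dict.empty : PySem.Dict String (PySem.Dict Int Int))).items.map (fun q => (q.1, q.2.items))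

-- ===== PORT B =====
def F_ematch_prof_act_alt (mat_prof : List (String × List (String × String))) (mat_act : List (List (String × String))) : List (String × List (Int × Int)) :=
  let index : PySem.Dict (Option String) (List Int) :=
    (PySem.List.enumerate mat_act).foldl (fun d q => d.modify (pvSpecB q.2) [] (fun x => x ++ [q.1])) PySem.Dict.empty
  (PySem.Dict.ofList mat_prof).items.foldl (fun acc q =>
    acc ++ [(q.1, (PySem.List.pyRange 0 (mat_act.length : Int) 1).map
      (fun i => (i, if i ∈ index.getD (pvSpecB q.2) [] then (1 : Int) else 0)))]) []

-- ===== PRECONDITION & SPEC =====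
-- Pre_ excludes exactly the inputs where Python A raises KeyError: both matrices nonempty
-- and some professional (dict value) or some activity lacks the 'Especialidad' key.
def Pre_F_ematch_prof_act (mat_prof : List (String × List (String × String))) (mat_act : List (List (String × String))) : Prop :=
  mat_prof = [] ∨ mat_act = [] ∨
    ((∀ v ∈ (PySem.Dict.ofList mat_prof).values, (PySem.Dict.ofList v).contains "Especialidad" = true) ∧
     (∀ a ∈ mat_act, (PySem.Dict.ofList a).contains "Especialidad" = true))
instance (mat_prof : List (String × List (String × String))) (mat_act : List (List (String × String))) : Decidable (Pre_F_ematch_prof_act mat_prof mat_act) := by unfold Pre_F_ematch_prof_act; infer_instance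

def pvWitness_F_ematch_prof_act : (List (String × List (String × String))) × (List (List (String × String))) :=
  ([("p", [("Especialidad", "x")]), ("q", [("Especialidad", "y")])], [[("Especialidad", "y")], [("Especialidad", "z")]])

def Spec_F_ematch_prof_act (mat_prof : List (String × List (String × String))) (mat_act : List (List (String × String))) (out : List (String × List (Int × Int))) : Prop := out = F_ematch_prof_act_alt mat_prof mat_act
instance (mat_prof : List (String × List (String × String))) (mat_act : List (List (String × String))) (out : List (String × List (Int × Int))) : Decidable (Spec_F_ematch_prof_act mat_prof mat_act out) := by unfold Spec_F_ematch_prof_act; infer_instance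

-- ===== CLAIM (what is proved, stated in full; the proofs are below) =====
def Claim_equal_F_ematch_prof_act : Prop := ∀ (mat_prof : List (String × List (String × String))) (mat_act : List (List (String × String))), Dom_F_ematch_prof_act mat_prof mat_act → Pre_F_ematch_prof_act mat_prof mat_act → Spec_F_ematch_prof_act mat_prof mat_act (F_ematch_prof_act mat_prof mat_act)

-- ===== LEMMAS AND PROOFS =====

-- A's inner loop repeatedly rewrites key p of e; it equals one insert of the accumulated row.
theorem pv_inner_loop (l : List Int) (b : Int → Bool) :
    ∀ (e : PySem.Dict String (PySem.Dict Int Int)) (p : String) (r : PySem.Dict Int Int),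
    l.foldl (fun e2 i =>
        if b i then e2.insert p ((e2.getD p PySem.Dict.empty).insert i 1)
        else e2.insert p ((e2.getD p PySem.Dict.empty).insert i 0)) (e.insert p r)
      = e.insert p (l.foldl (fun r i => r.insert i (if b i then 1 else 0)) r) := by
  induction l with
  | nil => intro e p r; rfl
  | cons i l ih =>
    intro e p r
    simp only [List.foldl_cons, PySem.Dict.getD_insert_self, PySem.Dict.insert_insert_self]
    by_cases h : b i = true
    · rw [if_pos h, if_pos h]
      simpa only [PySem.Dict.getD_insert_self, PySem.Dict.insert_insert_self] using ih e p (r.insert i 1)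
    · rw [if_neg h, if_neg h]
      simpa only [PySem.Dict.getD_insert_self, PySem.Dict.insert_insert_self] using ih e p (r.insert i 0)

-- B's grouping loop, characterised through getD_foldl_modify_append.
theorem pv_index_getD (l : List (Int × List (String × String))) (c : Option String) :
    (l.foldl (fun d q => d.modify (pvSpecB q.2) [] (fun x => x ++ [q.1])) PySem.Dict.empty).getD c []
      = ((l.map (fun q => (pvSpecB q.2, q.1))).filter (fun r => r.1 == c)).map (fun r => r.2) := by
  have h := PySem.Dict.getD_foldl_modify_append (l.map (fun q => (pvSpecB q.2, q.1))) PySem.Dict.empty c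
  rw [List.foldl_map] at h
  simpa using h

theorem F_ematch_prof_act_spec : Claim_equal_F_ematch_prof_act := by
  intro mp ma _ hpre
  show F_ematch_prof_act mp ma = F_ematch_prof_act_alt mp ma
  simp only [F_ematch_prof_act, F_ematch_prof_act_alt]
  -- A side: collapse the inner rewrite loop, then the outer fresh-key insert loop
  have hcong := PySem.List.foldl_congr_mem ((PySem.Dict.ofList mp).keys)
    (fun e p => (PySem.List.pyRange 0 (ma.length : Int) 1).foldl (fun e2 i =>
        if pvSpecA ((PySem.Dict.ofList mp).getD p []) == pvSpecA (PySem.List.pyGetD ma i []) then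
          e2.insert p ((e2.getD p PySem.Dict.empty).insert i 1)
        else
          e2.insert p ((e2.getD p PySem.Dict.empty).insert i 0))
        (e.insert p PySem.Dict.empty))
    (fun e p => e.insert p ((PySem.List.pyRange 0 (ma.length : Int) 1).foldl
        (fun r i => r.insert i (if pvSpecA ((PySem.Dict.ofList mp).getD p []) == pvSpecA (PySem.List.pyGetD ma i []) then (1 : Int) else 0)) PySem.Dict.empty))
    PySem.Dict.empty
    (fun e p _ => pv_inner_loop _ _ e p _)
  rw [hcong,
    PySem.Dict.items_foldl_insert_fresh ((PySem.Dict.ofList mp).keys) (fun p => p) _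
      PySem.Dict.empty (fun a _ => PySem.Dict.contains_empty a)
      (by simp [PySem.Dict.nodup_keys_ofList mp])]
  -- B side: the append loop is a map over items, items are keys paired with getD
  rw [PySem.List.foldl_append_singleton_eq_map,
    PySem.Dict.items_eq_map_keys (PySem.Dict.ofList mp) (PySem.Dict.nodup_keys_ofList mp) []]
  simp only [show (PySem.Dict.empty : PySem.Dict String (PySem.Dict Int Int)).items = [] from rfl,
    List.nil_append, List.map_map, Function.comp_def]
  apply List.map_congr_left
  intro p hp
  rw [PySem.Dict.items_foldl_insert_fresh (PySem.List.pyRange 0 (ma.length : Int) 1) (fun i => i) _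
      PySem.Dict.empty (fun a _ => PySem.Dict.contains_empty a)
      (by simpa using PySem.List.nodup_pyRange_one 0 (ma.length : Int))]
  simp only [show (PySem.Dict.empty : PySem.Dict Int Int).items = [] from rfl, List.nil_append]
  refine congrArg (Prod.mk p) ?_
  apply List.map_congr_left
  intro i hi
  -- bounds and nonemptiness
  have hib := PySem.List.mem_pyRange_one.mp hi
  have hlt : i.toNat < ma.length := by omega
  have hma : ma ≠ [] := by rintro rfl; simp at hlt
  have hmp : mp ≠ [] := by
    rintro rfl
    have hk : (PySem.Dict.ofList ([] : List (String × List (String × String)))).keys = [] := rfl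
    rw [hk] at hp
    exact absurd hp (List.not_mem_nil)
  rcases hpre with h | h | ⟨h1, h2⟩
  · exact absurd h hmp
  · exact absurd h hma
  -- the professional's and the activity's specialties exist
  have hspS : ((PySem.Dict.ofList ((PySem.Dict.ofList mp).getD p [])).get? "Especialidad").isSome := by
    rw [← PySem.Dict.contains_eq_isSome_get?]
    refine h1 _ ?_
    rw [PySem.Dict.values_eq_map_keys _ (PySem.Dict.nodup_keys_ofList mp) []]
    exact List.mem_map_of_mem hp
  obtain ⟨sp, hsp⟩ := Option.isSome_iff_exists.mp hspS
  have hsaS : ((PySem.Dict.ofList (ma[i.toNat]'hlt)).get? "Especialidad").isSome := by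
    rw [← PySem.Dict.contains_eq_isSome_get?]
    exact h2 _ (List.getElem_mem hlt)
  obtain ⟨sa, hsa⟩ := Option.isSome_iff_exists.mp hsaS
  have hsa' : pvSpecB (ma[i.toNat]'hlt) = some sa := hsa
  have e1 : pvSpecA ((PySem.Dict.ofList mp).getD p []) = sp :=
    PySem.Dict.getD_of_get?_eq_some _ _ hsp
  have e2 : PySem.List.pyGetD ma i [] = ma[i.toNat]'hlt :=
    PySem.List.pyGetD_eq_getElem ma [] hib.1 hib.2
  have e3 : pvSpecA (ma[i.toNat]'hlt) = sa :=
    PySem.Dict.getD_of_get?_eq_some _ _ hsa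
  have e4 : pvSpecB ((PySem.Dict.ofList mp).getD p []) = some sp := hsp
  rw [e1, e2, e3, e4, pv_index_getD]
  -- membership in the index group at sp ↔ the activity's specialty equals sp
  have hmem : (i ∈ (((PySem.List.enumerate ma).map (fun q => (pvSpecB q.2, q.1))).filter
      (fun r => r.1 == some sp)).map (fun r => r.2)) ↔ sa = sp := by
    constructor
    · intro hm
      obtain ⟨r, hrf, hri⟩ := List.mem_map.mp hm
      obtain ⟨hrl, hbq⟩ := List.mem_filter.mp hrf
      obtain ⟨q, hq, hqr⟩ := List.mem_map.mp hrl
      obtain ⟨k, hk, hq2⟩ := (PySem.List.mem_enumerate_iff ma 0 q).mp hq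
      subst hq2; subst hqr
      have hki : (k : Int) = i := by simpa using hri
      have hkk : k = i.toNat := by omega
      have hge : (ma[k]'hk) = ma[i.toNat]'hlt := by congr 1
      have hbq' : pvSpecB (ma[k]'hk) = some sp := by simpa using hbq
      rw [hge] at hbq'
      exact Option.some_injective _ (hsa'.symm.trans hbq')
    · intro hss
      refine List.mem_map.mpr ⟨(pvSpecB (ma[i.toNat]'hlt), ((0 : Int) + (i.toNat : Int))), ?_, by simpa using (by omega : (0:Int) + (i.toNat : Int) = i)⟩
      refine List.mem_filter.mpr ⟨?_, by simp [hsa', hss]⟩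
      exact List.mem_map.mpr ⟨(((0 : Int) + (i.toNat : Int)), ma[i.toNat]'hlt),
        (PySem.List.mem_enumerate_iff ma 0 _).mpr ⟨i.toNat, hlt, rfl⟩, rfl⟩
  by_cases hc : sa = sp
  · simp [hc, hmem]
  · have hbf : (sp == sa) = false := by
      simp only [beq_eq_false_iff_ne, ne_eq]
      exact fun h => hc h.symm
    simp [hbf, hmem, hc]
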